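-- pv_equiv track=rewrite | github.com/mohaali482/competitive-programming | Personal Development/advent-of-code-2023/day4/main.py | solution
-- ===== SOURCE A (Python) =====
-- def solution(line):
--     wining_cards, cards = line.split(" | ")
--     cards = set([int(i) for i in cards.split(" ") if i.isdigit()])
--     wining_cards = set([int(i) for i in wining_cards.split(" ")[2:] if i.isdigit()])
--     total = len(cards.intersection(wining_cards))
--     if total > 0:
--         return 2 ** (total-1)
--     else:
--         return 0
-- ===== SOURCE B (Python) =====
-- def solution(line):
--     winning_part, card_part = line.split(" | ")
--     w = sorted({int(t) for t in winning_part.split(" ")[2:] if t.isdigit()})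
--     c = sorted({int(t) for t in card_part.split(" ") if t.isdigit()})
--     # two-pointer merge over the two sorted, duplicate-free lists counts the common numbers
--     i = j = m = 0
--     while i < len(w) and j < len(c):
--         if w[i] == c[j]:
--             m += 1
--             i += 1
--             j += 1
--         elif w[i] < c[j]:
--             i += 1
--         else:
--             j += 1
--     return 2 ** (m - 1) if m else 0
-- ===== Notes on version B (the rewrite author's own statement) =====
-- stated objective: alternative
-- what changed: Replaces A's hash-set intersection count and closed-form 2**(total-1) with sorting both deduplicated number lists and counting the common elements by a two-pointer merge scan.
import Mathlib
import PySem

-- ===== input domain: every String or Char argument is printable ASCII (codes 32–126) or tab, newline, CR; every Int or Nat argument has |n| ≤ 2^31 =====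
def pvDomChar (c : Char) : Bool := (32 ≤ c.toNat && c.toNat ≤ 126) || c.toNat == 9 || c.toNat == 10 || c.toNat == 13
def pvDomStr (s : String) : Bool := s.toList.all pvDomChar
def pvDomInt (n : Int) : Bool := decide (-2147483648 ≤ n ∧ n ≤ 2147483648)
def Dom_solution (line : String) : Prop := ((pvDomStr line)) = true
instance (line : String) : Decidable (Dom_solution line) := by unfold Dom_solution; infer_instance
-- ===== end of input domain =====

-- B replaces A's hash-set intersection count with sorting both deduplicated number
-- lists and counting the common elements by a two-pointer merge (objective: alternative).

-- ===== PORT A =====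
def solution (line : String) : Int :=
  match (PySem.Str.split? line " | ").getD [] with
  | [winingStr, cardsStr] =>
    let cards : PySem.Set Int :=
      PySem.Set.ofList ((((PySem.Str.split? cardsStr " ").getD []).filter
        (fun i => PySem.Str.strIsdigit i)).map (fun i => (PySem.Int.ofStr? i).getD 0))
    let winingCards : PySem.Set Int :=
      PySem.Set.ofList (((PySem.List.slice ((PySem.Str.split? winingStr " ").getD []) (some 2) none).filter
        (fun i => PySem.Str.strIsdigit i)).map (fun i => (PySem.Int.ofStr? i).getD 0))
    let total : Nat := (PySem.Set.inter cards winingCards).length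
    if total > 0 then (2 : Int) ^ (total - 1) else 0
  | _ => 0   -- unreachable under Pre_solution (Python raises ValueError on unpacking)

-- ===== PORT B =====
-- the two-pointer merge loop of Source B: counts common elements of two lists walked in parallel
def mergeCount : List Int → List Int → Nat
  | [], _ => 0
  | _ :: _, [] => 0
  | a :: as, b :: bs =>
    if a = b then mergeCount as bs + 1
    else if a < b then mergeCount as (b :: bs)
    else mergeCount (a :: as) bs
termination_by w c => w.length + c.length
decreasing_by all_goals (first | (simp; omega) | simp)

def solution_alt (line : String) : Int :=
  let parts := (PySem.Str.split? line " | ").getD []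
  if parts.length = 2 then
    let winningPart := parts[0]!
    let cardPart := parts[1]!
    let w : List Int :=
      PySem.List.sorted (PySem.Set.ofList
        (((PySem.List.slice ((PySem.Str.split? winningPart " ").getD []) (some 2) none).filter
          (fun t => PySem.Str.strIsdigit t)).map (fun t => (PySem.Int.ofStr? t).getD 0)))
        (fun x => x) false
    let c : List Int :=
      PySem.List.sorted (PySem.Set.ofList
        ((((PySem.Str.split? cardPart " ").getD []).filter
          (fun t => PySem.Str.strIsdigit t)).map (fun t => (PySem.Int.ofStr? t).getD 0)))
        (fun x => x) false
    let m := mergeCount w c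
    if m ≠ 0 then (2 : Int) ^ (m - 1) else 0
  else 0   -- unreachable under Pre_solution (Python raises ValueError on unpacking)

-- ===== PRECONDITION & SPEC =====
-- Pre_ excludes exactly the lines where `line.split(" | ")` does not yield two parts, on which
-- both A's and B's tuple unpacking raise ValueError.
def Pre_solution (line : String) : Prop := ((PySem.Str.split? line " | ").getD []).length = 2
instance (line : String) : Decidable (Pre_solution line) := by unfold Pre_solution; infer_instance
def pvWitness_solution : String := "Card 1: 41 48 83 | 83 86 6 31 17 9 48 53"

def Spec_solution (line : String) (out : Int) : Prop := out = solution_alt line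
instance (line : String) (out : Int) : Decidable (Spec_solution line out) := by unfold Spec_solution; infer_instance

-- ===== CLAIM (what is proved, stated in full; the proofs are below) =====
def Claim_equal_solution : Prop := ∀ (line : String), Dom_solution line → Pre_solution line → Spec_solution line (solution line)

-- ===== LEMMAS AND PROOFS =====

-- On strictly increasing lists the merge counts exactly the elements of w that occur in c.
lemma mergeCount_eq_filter_length (w c : List Int)
    (hw : w.Pairwise (· < ·)) (hc : c.Pairwise (· < ·)) :
    mergeCount w c = (w.filter (fun x => decide (x ∈ c))).length := by
  induction w, c using mergeCount.induct with
  | case1 c => simp [mergeCount]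
  | case2 a as => simp [mergeCount]
  | case3 as b bs ih =>
    rw [List.pairwise_cons] at hw hc
    rw [mergeCount, if_pos rfl]
    simp only [List.filter_cons, List.mem_cons, true_or, decide_true]
    have hcg : as.filter (fun x => decide (x = b ∨ x ∈ bs)) = as.filter (fun x => decide (x ∈ bs)) := by
      apply List.filter_congr
      intro x hx
      have hax : b < x := hw.1 x hx
      simp only [decide_eq_decide]
      constructor
      · rintro (rfl | h)
        · omega
        · exact h
      · exact Or.inr
    rw [if_pos trivial, hcg, List.length_cons, ih hw.2 hc.2]
  | case4 a as b bs hab hlt ih =>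
    rw [List.pairwise_cons] at hw hc
    rw [mergeCount, if_neg hab, if_pos hlt]
    have hnot : a ∉ b :: bs := by
      intro h
      rcases List.mem_cons.mp h with rfl | h
      · omega
      · have := hc.1 a h; omega
    simp only [List.filter_cons, hnot, decide_false]
    exact ih hw.2 (List.pairwise_cons.mpr hc)
  | case5 a as b bs hab hlt ih =>
    rw [List.pairwise_cons] at hc
    rw [mergeCount, if_neg hab, if_neg hlt]
    have hcg : (a :: as).filter (fun x => decide (x ∈ b :: bs))
        = (a :: as).filter (fun x => decide (x ∈ bs)) := by
      apply List.filter_congr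
      intro x hx
      have hbx : b < x := by
        rw [List.pairwise_cons] at hw
        rcases List.mem_cons.mp hx with rfl | h
        · omega
        · have := hw.1 x h; omega
      simp only [List.mem_cons, decide_eq_decide]
      constructor
      · rintro (rfl | h)
        · omega
        · exact h
      · exact Or.inr
    rw [hcg]
    exact ih hw hc.2

-- Counting u's elements that lie in v is symmetric when both lists are duplicate-free.
lemma filter_mem_length_comm (u v : List Int) (hu : u.Nodup) (hv : v.Nodup) :
    (u.filter (fun x => decide (x ∈ v))).length = (v.filter (fun x => decide (x ∈ u))).length := by
  rw [← List.toFinset_card_of_nodup (hu.filter _), ← List.toFinset_card_of_nodup (hv.filter _)]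
  rw [List.toFinset_filter, List.toFinset_filter]
  congr 1
  ext x
  simp [and_comm]

-- The two-pointer count over the sorted deduplicated lists equals A's intersection size.
lemma mergeCount_sorted_eq_inter_length (W C : List Int) :
    mergeCount (PySem.List.sorted (PySem.Set.ofList W) (fun x => x) false)
               (PySem.List.sorted (PySem.Set.ofList C) (fun x => x) false)
      = (PySem.Set.inter (PySem.Set.ofList C) (PySem.Set.ofList W)).length := by
  have hpw : (PySem.List.sorted (PySem.Set.ofList W) (fun x => x) false).Pairwise (· < ·) :=
    PySem.List.sorted_ofList_pairwise_lt W
  have hpc : (PySem.List.sorted (PySem.Set.ofList C) (fun x => x) false).Pairwise (· < ·) :=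
    PySem.List.sorted_ofList_pairwise_lt C
  rw [mergeCount_eq_filter_length _ _ hpw hpc]
  -- membership in the sorted card list is membership in set(C)
  have h1 : (PySem.List.sorted (PySem.Set.ofList W) (fun x => x) false).filter
        (fun x => decide (x ∈ PySem.List.sorted (PySem.Set.ofList C) (fun x => x) false))
      = (PySem.List.sorted (PySem.Set.ofList W) (fun x => x) false).filter
        (fun x => decide (x ∈ PySem.Set.ofList C)) := by
    apply List.filter_congr
    intro x _
    simp [PySem.List.mem_sorted]
  rw [h1]
  -- the sorted winning list is a permutation of set(W), so the filtered length is unchanged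
  have h2 : ((PySem.List.sorted (PySem.Set.ofList W) (fun x => x) false).filter
        (fun x => decide (x ∈ PySem.Set.ofList C))).length
      = ((PySem.Set.ofList W).filter (fun x => decide (x ∈ PySem.Set.ofList C))).length :=
    ((PySem.List.sorted_perm (PySem.Set.ofList W) (fun x => x) false).filter _).length_eq
  rw [h2, filter_mem_length_comm _ _ (PySem.Set.nodup_ofList W) (PySem.Set.nodup_ofList C)]
  -- A's intersection is exactly this filter
  rw [show PySem.Set.inter (PySem.Set.ofList C) (PySem.Set.ofList W)
      = (PySem.Set.ofList C).filter (fun x => PySem.Set.contains (PySem.Set.ofList W) x) from rfl]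
  have h3 : ((PySem.Set.ofList C).filter (fun x => PySem.Set.contains (PySem.Set.ofList W) x))
      = ((PySem.Set.ofList C).filter (fun x : Int => decide (x ∈ PySem.Set.ofList W))) := by
    apply List.filter_congr
    intro x _
    by_cases h : x ∈ PySem.Set.ofList W <;> simp [h]
  rw [h3]

-- ===== VERDICT (by name: the statement is the Claim_ definition above) =====
theorem solution_spec : Claim_equal_solution := by
  intro line _ hpre
  unfold Pre_solution at hpre
  unfold Spec_solution solution solution_alt
  generalize h : (PySem.Str.split? line " | ").getD [] = parts at hpre ⊢
  match parts, hpre with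
  | [a, b], _ =>
    simp only [List.length_cons, List.length_nil, Nat.reduceAdd, reduceIte,
      List.getElem!_cons_zero, List.getElem!_cons_succ]
    rw [mergeCount_sorted_eq_inter_length]
    split_ifs with h1 h2
    · rfl
    · omega
    · omega
    · rfl
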